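-- pv_equiv track=rewrite | github.com/nathan-cordner/mha2024 | sentence_analysis/sentence_checker.py | sentence_bound
-- ===== SOURCE A (Python) =====
-- def sentence_bound(text, place, end_place, left, right):
--     """
--     keyword is found in text[place:end_place]
--     """
--     line_end_chars = ["!", "?", "."] #, ";"]
--
--     lower_bound = 0
--     left_text = text[left:place]
--
--     for char in line_end_chars:
--         val = left_text.rfind(char)
--         if val > lower_bound:
--             lower_bound = val
--     lower_bound += left + 1 # adjust to full string
--
--     upper_bound = right
--     right_text = text[end_place:right]
--
--     for char in line_end_chars:
--         val = right_text.find(char)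
--         if val < upper_bound and val != -1:
--             upper_bound = val
--     upper_bound += end_place
--
--     return lower_bound, upper_bound
-- ===== SOURCE B (Python) =====
-- def sentence_bound(text, place, end_place, left, right):
--     """
--     keyword is found in text[place:end_place]
--     """
--     ends = "!?."
--
--     lower_bound = 0
--     for i, ch in enumerate(text[left:place]):
--         if ch in ends:
--             lower_bound = i
--     lower_bound += left + 1  # adjust to full string
--
--     upper_bound = right
--     for i, ch in enumerate(text[end_place:right]):
--         if ch in ends:
--             upper_bound = i
--             break
--     upper_bound += end_place
--
--     return lower_bound, upper_bound
-- ===== Notes on version B (the rewrite author's own statement) =====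
-- stated objective: alternative
-- what changed: A makes three separate rfind/find library passes over each text segment (one per punctuation character); B makes a single enumerate scan per segment, keeping the last punctuation index on the left and stopping at the first punctuation on the right.
-- intended difference: When right is negative (a Python negative slice index) and text[end_place:right] contains a sentence-ending character, A ignores the found punctuation and returns right+end_place as the upper bound, while B returns the punctuation's position end_place+i, which is the intended sentence boundary. — e.g. on sentence_bound(".a.", 1, 0, 0, -1): A returns (1, -1), B returns (1, 0)
import Mathlib
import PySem

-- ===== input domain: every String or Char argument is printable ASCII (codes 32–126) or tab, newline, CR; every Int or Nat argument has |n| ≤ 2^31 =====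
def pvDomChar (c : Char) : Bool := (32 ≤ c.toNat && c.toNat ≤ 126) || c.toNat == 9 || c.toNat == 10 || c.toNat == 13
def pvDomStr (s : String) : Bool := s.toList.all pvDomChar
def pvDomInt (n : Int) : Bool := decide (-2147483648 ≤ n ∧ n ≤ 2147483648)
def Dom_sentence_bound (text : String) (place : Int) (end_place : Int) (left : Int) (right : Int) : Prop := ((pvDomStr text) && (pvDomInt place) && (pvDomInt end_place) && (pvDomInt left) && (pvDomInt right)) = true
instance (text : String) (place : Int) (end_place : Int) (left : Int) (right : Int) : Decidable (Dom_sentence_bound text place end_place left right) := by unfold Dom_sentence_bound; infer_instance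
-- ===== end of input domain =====

-- B replaces A's three rfind/find library passes per side with ONE scan per side
-- (left: keep the last punctuation index; right: stop at the first punctuation); objective: alternative.

-- ===== PORT A =====
-- Python: line_end_chars = ["!", "?", "."]  (single-character strings, as char lists)
def pvLineEndChars : List (List Char) := [['!'], ['?'], ['.']]

def sentence_bound (text : String) (place : Int) (end_place : Int) (left : Int) (right : Int) : Int × Int :=
  let cs := text.toList
  let left_text := PySem.List.slice cs (some left) (some place)
  let lower_bound : Int :=
    pvLineEndChars.foldl (fun lb ch =>
      let val := PySem.Chars.rfind left_text ch
      if lb < val then val else lb) 0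
  let lower_bound := lower_bound + left + 1
  let right_text := PySem.List.slice cs (some end_place) (some right)
  let upper_bound : Int :=
    pvLineEndChars.foldl (fun ub ch =>
      let val := PySem.Chars.find right_text ch
      if val < ub ∧ val ≠ -1 then val else ub) right
  let upper_bound := upper_bound + end_place
  (lower_bound, upper_bound)

-- ===== PORT B =====
-- right-side loop of Source B: for i, ch in enumerate(text[end_place:right]): if ch in ends: (take i, break)
def pvAltRightScan : List (Int × Char) → Int → Int
  | [], ub => ub
  | (i, ch) :: rest, ub =>
    if ch ∈ ['!', '?', '.'] then i else pvAltRightScan rest ub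

def sentence_bound_alt (text : String) (place : Int) (end_place : Int) (left : Int) (right : Int) : Int × Int :=
  let cs := text.toList
  let lower_bound : Int :=
    (PySem.List.enumerate (PySem.List.slice cs (some left) (some place))).foldl
      (fun lb p => if p.2 ∈ ['!', '?', '.'] then p.1 else lb) 0
  let upper_bound : Int :=
    pvAltRightScan (PySem.List.enumerate (PySem.List.slice cs (some end_place) (some right))) right
  (lower_bound + left + 1, upper_bound + end_place)

-- ===== PRECONDITION & SPEC =====
-- When right is negative (a Python negative slice index) and text[end_place:right] contains a
-- sentence-ending character, A ignores the found punctuation and returns right+end_place as the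
-- upper bound, while B returns the punctuation's position end_place+i, the intended boundary.
def D_sentence_bound (text : String) (place : Int) (end_place : Int) (left : Int) (right : Int) : Prop :=
  right < 0 ∧ (PySem.List.slice text.toList (some end_place) (some right)).any
      (fun c => c ∈ ['!', '?', '.']) = true
instance (text : String) (place : Int) (end_place : Int) (left : Int) (right : Int) : Decidable (D_sentence_bound text place end_place left right) := by unfold D_sentence_bound; infer_instance

def Spec_sentence_bound (text : String) (place : Int) (end_place : Int) (left : Int) (right : Int) (out : Int × Int) : Prop := ¬ D_sentence_bound text place end_place left right → out = sentence_bound_alt text place end_place left right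
instance (text : String) (place : Int) (end_place : Int) (left : Int) (right : Int) (out : Int × Int) : Decidable (Spec_sentence_bound text place end_place left right out) := by unfold Spec_sentence_bound; infer_instance

def pvDiffWitness_sentence_bound : String × Int × Int × Int × Int := (".a.", 1, 0, 0, -1)
def pvDiffWitnessOut_sentence_bound : (Int × Int) × (Int × Int) := ((1, -1), (1, 0))

-- ===== CLAIM (what is proved, stated in full; the proofs are below) =====
def Claim_unchanged_sentence_bound : Prop := ∀ (text : String) (place : Int) (end_place : Int) (left : Int) (right : Int), Dom_sentence_bound text place end_place left right → Spec_sentence_bound text place end_place left right (sentence_bound text place end_place left right)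
def Claim_changed_sentence_bound : Prop := Dom_sentence_bound (pvDiffWitness_sentence_bound.1) (pvDiffWitness_sentence_bound.2.1) (pvDiffWitness_sentence_bound.2.2.1) (pvDiffWitness_sentence_bound.2.2.2.1) (pvDiffWitness_sentence_bound.2.2.2.2) ∧ D_sentence_bound (pvDiffWitness_sentence_bound.1) (pvDiffWitness_sentence_bound.2.1) (pvDiffWitness_sentence_bound.2.2.1) (pvDiffWitness_sentence_bound.2.2.2.1) (pvDiffWitness_sentence_bound.2.2.2.2) ∧ sentence_bound (pvDiffWitness_sentence_bound.1) (pvDiffWitness_sentence_bound.2.1) (pvDiffWitness_sentence_bound.2.2.1) (pvDiffWitness_sentence_bound.2.2.2.1) (pvDiffWitness_sentence_bound.2.2.2.2) = pvDiffWitnessOut_sentence_bound.1 ∧ sentence_bound_alt (pvDiffWitness_sentence_bound.1) (pvDiffWitness_sentence_bound.2.1) (pvDiffWitness_sentence_bound.2.2.1) (pvDiffWitness_sentence_bound.2.2.2.1) (pvDiffWitness_sentence_bound.2.2.2.2) = pvDiffWitnessOut_sentence_bound.2 ∧ pvDiffWitnessOut_sentence_bound.1 ≠ pvDiffWitnessO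ut_sentence_bound.2
def Claim_exact_sentence_bound : Prop := ∀ (text : String) (place : Int) (end_place : Int) (left : Int) (right : Int), Dom_sentence_bound text place end_place left right → D_sentence_bound text place end_place left right → sentence_bound text place end_place left right ≠ sentence_bound_alt text place end_place left right

-- ===== LEMMAS AND PROOFS =====

theorem prefix_single (d c : Char) (t : List Char) :
    [d].isPrefixOf (c :: t) = decide (c = d) := by
  simp [List.isPrefixOf, beq_eq_decide, eq_comm]

-- ---- left side: rfind of a single char, characterised by snoc ----

theorem rgo_snoc (s : List Char) (c d : Char) (n : Nat) (hn : n < s.length) :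
    PySem.Chars.rfind.go (s ++ [c]) [d] n = PySem.Chars.rfind.go s [d] n := by
  induction n with
  | zero =>
    rw [PySem.Chars.rfind.go, PySem.Chars.rfind.go]
    cases s with
    | nil => simp at hn
    | cons a t => simp [prefix_single]
  | succ j ih =>
    rw [PySem.Chars.rfind.go]
    conv_rhs => rw [PySem.Chars.rfind.go]
    rw [List.drop_append_of_le_length (by omega)]
    have hne : s.drop (j+1) ≠ [] := by
      intro h; have := List.drop_eq_nil_iff.mp h; omega
    obtain ⟨a, t, ht⟩ := List.exists_cons_of_ne_nil hne
    rw [ht]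
    simp only [List.cons_append, prefix_single]
    rw [ih (by omega)]

theorem rfind_single_snoc (s : List Char) (c d : Char) :
    PySem.Chars.rfind (s ++ [c]) [d] = if c = d then (s.length : Int) else PySem.Chars.rfind s [d] := by
  rw [PySem.Chars.rfind, PySem.Chars.rfind]
  have hlen : (s ++ [c]).length = s.length + 1 := by simp
  rw [hlen, PySem.Chars.rfind.go]
  have hdrop : (s ++ [c]).drop (s.length + 1) = [] := by
    apply List.drop_eq_nil_iff.mpr; simp
  rw [hdrop]
  simp only [List.isPrefixOf, Bool.false_eq_true, if_false]
  cases hs : s.length with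
  | zero =>
    have : s = [] := List.eq_nil_of_length_eq_zero hs
    subst this
    rw [PySem.Chars.rfind.go, PySem.Chars.rfind.go]
    simp [prefix_single, List.isPrefixOf]
  | succ m =>
    rw [PySem.Chars.rfind.go]
    have hdm : (s ++ [c]).drop (m + 1) = [c] := by
      rw [List.drop_append_of_le_length (by omega),
          List.drop_eq_nil_iff.mpr (by omega), List.nil_append]
    rw [hdm, prefix_single, rgo_snoc s c d m (by omega)]
    conv_rhs => rw [PySem.Chars.rfind.go]
    rw [List.drop_eq_nil_iff.mpr (by omega)]
    simp only [List.isPrefixOf, Bool.false_eq_true, if_false]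
    by_cases h : c = d <;> simp [h]

theorem rfind_single_nil (d : Char) : PySem.Chars.rfind [] [d] = -1 := by
  simp [PySem.Chars.rfind, PySem.Chars.rfind.go, List.isPrefixOf]

theorem rfind_single_bounds (s : List Char) (d : Char) :
    -1 ≤ PySem.Chars.rfind s [d] ∧ PySem.Chars.rfind s [d] < s.length := by
  induction s using List.reverseRecOn with
  | nil => simp [rfind_single_nil]
  | append_singleton s c ih =>
    rw [rfind_single_snoc]
    simp only [List.length_append, List.length_cons, List.length_nil]
    split_ifs <;> push_cast <;> omega

-- A's left fold, unfolded to its three update steps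
def pvLStep (lb v : Int) : Int := if lb < v then v else lb

theorem lfold_unfold (s : List Char) :
    pvLineEndChars.foldl (fun lb ch =>
      let val := PySem.Chars.rfind s ch
      if lb < val then val else lb) 0
    = pvLStep (pvLStep (pvLStep 0 (PySem.Chars.rfind s ['!'])) (PySem.Chars.rfind s ['?']))
        (PySem.Chars.rfind s ['.']) := by
  simp [pvLineEndChars, List.foldl, pvLStep]

theorem lfold_snoc_unfold (s : List Char) (c : Char) :
    pvLineEndChars.foldl (fun lb ch =>
      let val := PySem.Chars.rfind (s ++ [c]) ch
      if lb < val then val else lb) 0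
    = pvLStep (pvLStep (pvLStep 0 (PySem.Chars.rfind (s ++ [c]) ['!'])) (PySem.Chars.rfind (s ++ [c]) ['?']))
        (PySem.Chars.rfind (s ++ [c]) ['.']) := lfold_unfold (s ++ [c])

theorem lfold_bounds (s : List Char) :
    0 ≤ pvLStep (pvLStep (pvLStep 0 (PySem.Chars.rfind s ['!'])) (PySem.Chars.rfind s ['?']))
        (PySem.Chars.rfind s ['.'])
    ∧ (pvLStep (pvLStep (pvLStep 0 (PySem.Chars.rfind s ['!'])) (PySem.Chars.rfind s ['?']))
        (PySem.Chars.rfind s ['.']) < s.length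
       ∨ pvLStep (pvLStep (pvLStep 0 (PySem.Chars.rfind s ['!'])) (PySem.Chars.rfind s ['?']))
        (PySem.Chars.rfind s ['.']) = 0) := by
  obtain ⟨h1l, h1r⟩ := rfind_single_bounds s '!'
  obtain ⟨h2l, h2r⟩ := rfind_single_bounds s '?'
  obtain ⟨h3l, h3r⟩ := rfind_single_bounds s '.'
  unfold pvLStep
  split_ifs <;> omega

theorem enum_foldl_snoc (s : List Char) (c : Char) (f : Int → (Int × Char) → Int) (init : Int) :
    (PySem.List.enumerate (s ++ [c])).foldl f init
    = f ((PySem.List.enumerate s).foldl f init) ((s.length : Int), c) := by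
  rw [PySem.List.enumerate_append, List.foldl_append, PySem.List.enumerate_cons,
      PySem.List.enumerate_nil]
  simp [List.foldl]

-- A's left fold equals B's left scan, on any segment
theorem left_eq (seg : List Char) :
    pvLineEndChars.foldl (fun lb ch =>
      let val := PySem.Chars.rfind seg ch
      if lb < val then val else lb) 0
    = (PySem.List.enumerate seg).foldl
        (fun lb p => if p.2 ∈ ['!', '?', '.'] then p.1 else lb) 0 := by
  induction seg using List.reverseRecOn with
  | nil => simp [pvLineEndChars, rfind_single_nil, PySem.List.enumerate_nil, List.foldl]
  | append_singleton s c ih =>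
    rw [enum_foldl_snoc, ← ih, lfold_snoc_unfold, lfold_unfold]
    obtain ⟨hbl, hbr⟩ := lfold_bounds s
    obtain ⟨h1l, h1r⟩ := rfind_single_bounds s '!'
    obtain ⟨h2l, h2r⟩ := rfind_single_bounds s '?'
    obtain ⟨h3l, h3r⟩ := rfind_single_bounds s '.'
    by_cases hc : c ∈ ['!', '?', '.']
    · rcases (by simpa using hc : c = '!' ∨ c = '?' ∨ c = '.') with rfl | rfl | rfl <;>
      · simp only [rfind_single_snoc, reduceIte, List.mem_cons, List.not_mem_nil,
          or_false, or_true, if_true, Char.reduceEq]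
        unfold pvLStep at *
        split_ifs at * <;> omega
    · have hc1 : ¬ c = '!' := fun h => hc (by simp [h])
      have hc2 : ¬ c = '?' := fun h => hc (by simp [h])
      have hc3 : ¬ c = '.' := fun h => hc (by simp [h])
      simp only [rfind_single_snoc, if_neg hc1, if_neg hc2, if_neg hc3, if_neg hc]

-- ---- right side: find of a single char, characterised by cons ----

theorem findgo_shift (d : Char) (t : List Char) (k : Nat) :
    PySem.Chars.find.go [d] t k = if PySem.Chars.find.go [d] t 0 = -1 then -1 else PySem.Chars.find.go [d] t 0 + k := by
  induction t generalizing k with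
  | nil => simp [PySem.Chars.find.go]
  | cons c t ih =>
    have hb : -1 ≤ PySem.Chars.find.go [d] t 0 := PySem.Chars.neg_one_le_find t [d]
    rw [PySem.Chars.find.go]
    conv_rhs => rw [PySem.Chars.find.go]
    by_cases h : [d].isPrefixOf (c :: t)
    · simp [h]
    · simp only [h, if_false, Bool.false_eq_true]
      rw [ih (k+1), ih 1]
      split_ifs <;> omega

theorem find_single_cons (d c : Char) (t : List Char) :
    PySem.Chars.find (c :: t) [d] =
      if c = d then 0 else (if PySem.Chars.find t [d] = -1 then -1 else PySem.Chars.find t [d] + 1) := by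
  rw [PySem.Chars.find, PySem.Chars.find.go, prefix_single]
  by_cases h : c = d
  · simp [h]
  · simp only [h, decide_false, if_false, Bool.false_eq_true]
    rw [findgo_shift, PySem.Chars.find]
    split_ifs <;> omega

theorem find_single_nil (d : Char) : PySem.Chars.find [] [d] = -1 := by
  simp [PySem.Chars.find, PySem.Chars.find.go]

-- one update step of A's right-hand loop, and the index shift of a cons
def pvStep (ub v : Int) : Int := if v < ub ∧ v ≠ -1 then v else ub
def pvSh (v : Int) : Int := if v = -1 then -1 else v + 1

theorem find_single_cons' (d c : Char) (t : List Char) (h : ¬ c = d) :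
    PySem.Chars.find (c :: t) [d] = pvSh (PySem.Chars.find t [d]) := by
  rw [find_single_cons, if_neg h]; rfl

theorem fold_unfold (s : List Char) (R : Int) :
    pvLineEndChars.foldl (fun ub ch =>
      let val := PySem.Chars.find s ch
      if val < ub ∧ val ≠ -1 then val else ub) R
    = pvStep (pvStep (pvStep R (PySem.Chars.find s ['!'])) (PySem.Chars.find s ['?']))
        (PySem.Chars.find s ['.']) := by
  simp [pvLineEndChars, List.foldl, pvStep]

set_option maxHeartbeats 1000000 in
theorem pvShift3 (m1 m2 m3 R : Int) (h1 : -1 ≤ m1) (h2 : -1 ≤ m2) (h3 : -1 ≤ m3) :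
    pvStep (pvStep (pvStep R (pvSh m1)) (pvSh m2)) (pvSh m3)
    = if pvStep (pvStep (pvStep (R-1) m1) m2) m3 = R - 1 then R
      else pvStep (pvStep (pvStep (R-1) m1) m2) m3 + 1 := by
  unfold pvStep pvSh
  split_ifs <;> omega

-- index (relative) of the first sentence-ending character of a segment
def pvFirstPunct : List Char → Option Nat
  | [] => none
  | c :: t => if c ∈ ['!', '?', '.'] then some 0 else (pvFirstPunct t).map (· + 1)

def pvCapAt (k ub : Int) : Option Nat → Int
  | none => ub
  | some i => if k + (i : Int) < ub then k + (i : Int) else ub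

theorem scan_char (s : List Char) (k ub : Int) :
    pvAltRightScan (PySem.List.enumerate s k) ub
    = (pvFirstPunct s).elim ub (fun i => k + (i : Int)) := by
  induction s generalizing k with
  | nil => simp [PySem.List.enumerate_nil, pvAltRightScan, pvFirstPunct]
  | cons c t ih =>
    rw [PySem.List.enumerate_cons]
    by_cases hc : c ∈ ['!', '?', '.']
    · simp [pvAltRightScan, hc, pvFirstPunct]
    · simp only [pvAltRightScan, if_neg hc, pvFirstPunct, ih (k+1)]
      cases hfp : pvFirstPunct t with
      | none => simp
      | some i => simp; omega

set_option maxHeartbeats 1000000 in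
theorem find_fold_char (s : List Char) (right : Int) :
    pvLineEndChars.foldl (fun ub ch =>
      let val := PySem.Chars.find s ch
      if val < ub ∧ val ≠ -1 then val else ub) right
    = pvCapAt 0 right (pvFirstPunct s) := by
  induction s generalizing right with
  | nil =>
    rw [fold_unfold]
    simp [find_single_nil, pvStep, pvFirstPunct, pvCapAt]
  | cons c t ih =>
    have hb1 : -1 ≤ PySem.Chars.find t ['!'] := PySem.Chars.neg_one_le_find t ['!']
    have hb2 : -1 ≤ PySem.Chars.find t ['?'] := PySem.Chars.neg_one_le_find t ['?']
    have hb3 : -1 ≤ PySem.Chars.find t ['.'] := PySem.Chars.neg_one_le_find t ['.']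
    rw [fold_unfold]
    by_cases hc : c ∈ ['!', '?', '.']
    · rcases (by simpa using hc : c = '!' ∨ c = '?' ∨ c = '.') with rfl | rfl | rfl <;>
      · simp only [find_single_cons, pvFirstPunct, List.mem_cons, List.not_mem_nil,
          or_false, or_true, true_or, if_true, pvCapAt, pvStep]
        split_ifs <;> omega
    · have hc1 : ¬ c = '!' := fun h => hc (by simp [h])
      have hc2 : ¬ c = '?' := fun h => hc (by simp [h])
      have hc3 : ¬ c = '.' := fun h => hc (by simp [h])
      rw [find_single_cons' '!' c t hc1, find_single_cons' '?' c t hc2,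
          find_single_cons' '.' c t hc3,
          pvShift3 _ _ _ _ hb1 hb2 hb3, ← fold_unfold t (right - 1), ih (right - 1)]
      simp only [pvFirstPunct, if_neg hc]
      cases hfp : pvFirstPunct t with
      | none => simp [pvCapAt]
      | some i =>
        simp only [Option.map_some, pvCapAt]
        have hi : (0 : Int) ≤ (i : Int) := Int.natCast_nonneg i
        push_cast
        split_ifs <;> omega

-- first-punct index is an index of the segment
theorem firstPunct_lt_length (s : List Char) (i : Nat) (h : pvFirstPunct s = some i) :
    i < s.length := by
  induction s generalizing i with
  | nil => simp [pvFirstPunct] at h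
  | cons c t ih =>
    by_cases hc : c ∈ ['!', '?', '.']
    · simp [pvFirstPunct, hc] at h
      simp only [List.length_cons]
      omega
    · simp only [pvFirstPunct, if_neg hc] at h
      cases hfp : pvFirstPunct t with
      | none => rw [hfp] at h; simp at h
      | some j =>
        rw [hfp] at h
        simp only [Option.map_some, Option.some.injEq] at h
        have hj := ih j hfp
        simp only [List.length_cons]
        omega

-- a punctuation occurs in the segment iff pvFirstPunct finds one
theorem firstPunct_isSome_iff (s : List Char) :
    (pvFirstPunct s).isSome = s.any (fun c => c ∈ ['!', '?', '.']) := by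
  induction s with
  | nil => simp [pvFirstPunct]
  | cons c t ih =>
    by_cases hc : c ∈ ['!', '?', '.']
    · have := (by simpa using hc : c = '!' ∨ c = '?' ∨ c = '.')
      simp [pvFirstPunct, hc, List.any_cons]
      tauto
    · have hc1 : ¬ c = '!' := fun h => hc (by simp [h])
      have hc2 : ¬ c = '?' := fun h => hc (by simp [h])
      have hc3 : ¬ c = '.' := fun h => hc (by simp [h])
      simp [pvFirstPunct, hc, Option.isSome_map, ih, hc1, hc2, hc3]

-- a slice with nonnegative upper bound is shorter than that bound
theorem slice_length_le (cs : List Char) (a b : Int) (hb : 0 ≤ b) :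
    ((PySem.List.slice cs (some a) (some b)).length : Int) ≤ b := by
  rw [PySem.List.length_slice]
  have h1 : PySem.List.clampIdx cs.length b ≤ b.toNat := by
    have hb' : b = ((b.toNat : Nat) : Int) := by omega
    rw [hb', PySem.List.clampIdx_natCast]
    exact Nat.min_le_left _ _
  omega

-- ===== VERDICT (by name: the statement is the Claim_ definition above) =====
theorem sentence_bound_spec : Claim_unchanged_sentence_bound := by
  intro text place end_place left right _ hD
  unfold sentence_bound sentence_bound_alt
  simp only []
  rw [left_eq, find_fold_char, scan_char]
  cases hfp : pvFirstPunct (PySem.List.slice text.toList (some end_place) (some right)) with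
  | none => simp [pvCapAt]
  | some i =>
    have hsome : (pvFirstPunct (PySem.List.slice text.toList (some end_place) (some right))).isSome := by
      rw [hfp]; rfl
    rw [firstPunct_isSome_iff] at hsome
    have hr : 0 ≤ right := by
      by_contra hneg
      exact hD ⟨by omega, hsome⟩
    have hlt := firstPunct_lt_length _ i hfp
    have hlen := slice_length_le text.toList end_place right hr
    simp only [pvCapAt, Option.elim, zero_add]
    rw [if_pos (by omega)]

theorem sentence_bound_changed : Claim_changed_sentence_bound := by
  unfold Claim_changed_sentence_bound; decide

theorem sentence_bound_tight : Claim_exact_sentence_bound := by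
  intro text place end_place left right _ hD heq
  obtain ⟨hr, hany⟩ := hD
  unfold sentence_bound sentence_bound_alt at heq
  simp only [] at heq
  rw [left_eq, find_fold_char, scan_char] at heq
  have h2 := congrArg Prod.snd heq
  simp only [] at h2
  cases hfp : pvFirstPunct (PySem.List.slice text.toList (some end_place) (some right)) with
  | none =>
    rw [← firstPunct_isSome_iff, hfp] at hany
    simp at hany
  | some i =>
    rw [hfp] at h2
    simp only [pvCapAt, Option.elim, zero_add] at h2
    rw [if_neg (by have := Int.natCast_nonneg i; omega)] at h2
    have := Int.natCast_nonneg i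
    omega
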